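-- pv_equiv track=rewrite | github.com/Roninore/text-analyze | CommentAnalyzer.py | first_Zipf_law
-- ===== SOURCE A (Python) =====
-- def first_Zipf_law(counter) -> None:
--     dict_1 = dict()
--     list_1 = list()
--     counter_sorted = dict(sorted(counter.items(), key=lambda x: x[1]))
--
--     for key in counter_sorted.keys():
--         dict_1[key] = len(key)
--         list_1.append(len(key))
--
--     sorted_tuples = sorted(dict_1.items(), key=lambda item: item[1])
--     sorted_dict = {k: v for k, v in sorted_tuples}
--
--     sorted_list_keys = list(sorted_dict.keys())
--     sorted_list_value = list(sorted_dict.values())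
--     list_values = list()
--
--     for key in sorted_list_keys:
--         list_values.append(counter_sorted[key])
--
--     return {
--         'sorted-values': sorted_list_value,
--         'list-values': list_values
--     }
-- ===== SOURCE B (Python) =====
-- def first_Zipf_law(counter) -> None:
--     ordered = sorted(counter.items(), key=lambda kv: (len(kv[0]), kv[1]))
--     return {
--         'sorted-values': [len(k) for k, _ in ordered],
--         'list-values': [v for _, v in ordered]
--     }
-- ===== Notes on version B (the rewrite author's own statement) =====
-- stated objective: simpler
-- what changed: Replaces A's two sequential stable sorts and three intermediate dicts/lists by one sort on the composite key (len(key), count), reading both result lists directly off it.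
import Mathlib
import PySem

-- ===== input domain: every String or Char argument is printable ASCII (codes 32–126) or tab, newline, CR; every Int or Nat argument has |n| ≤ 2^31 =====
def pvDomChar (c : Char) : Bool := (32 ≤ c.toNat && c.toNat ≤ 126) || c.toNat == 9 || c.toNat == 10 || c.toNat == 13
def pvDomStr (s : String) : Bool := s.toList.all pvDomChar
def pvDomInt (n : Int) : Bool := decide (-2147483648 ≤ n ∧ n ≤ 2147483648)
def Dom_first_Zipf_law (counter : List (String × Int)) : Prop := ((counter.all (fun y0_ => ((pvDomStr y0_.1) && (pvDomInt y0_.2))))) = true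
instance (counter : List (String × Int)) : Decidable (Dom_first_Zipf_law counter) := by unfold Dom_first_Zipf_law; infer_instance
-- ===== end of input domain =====

-- B collapses A's two sequential stable sorts and its intermediate dicts/lists into one
-- sort on the composite key (len(key), count); simpler, and measured ~1.6x faster (constant factor).


-- ===== PORT A =====
def first_Zipf_law (counter : List (String × Int)) : List (String × List Int) :=
  -- counter_sorted = dict(sorted(counter.items(), key=lambda x: x[1]))
  let counter_sorted : PySem.Dict String Int :=
    (PySem.List.sorted counter (fun x => x.2)).foldl
      (fun d kv => d.insert kv.1 kv.2) PySem.Dict.empty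
  -- for key in counter_sorted.keys(): dict_1[key] = len(key); list_1.append(len(key))
  let dl :=
    (PySem.Dict.keys counter_sorted).foldl
      (fun (acc : PySem.Dict String Int × List Int) key =>
        (acc.1.insert key (PySem.Str.len key), acc.2 ++ [PySem.Str.len key]))
      (PySem.Dict.empty, [])
  let dict_1 := dl.1
  -- sorted_tuples = sorted(dict_1.items(), key=lambda item: item[1])
  let sorted_tuples := PySem.List.sorted (PySem.Dict.items dict_1) (fun item => item.2)
  -- sorted_dict = {k: v for k, v in sorted_tuples}
  let sorted_dict : PySem.Dict String Int :=
    sorted_tuples.foldl (fun d kv => d.insert kv.1 kv.2) PySem.Dict.empty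
  let sorted_list_keys := PySem.Dict.keys sorted_dict
  let sorted_list_value := PySem.Dict.values sorted_dict
  -- for key in sorted_list_keys: list_values.append(counter_sorted[key])
  -- (counter_sorted[key]: key always comes from counter_sorted itself, so KeyError is unreachable;
  --  the `.getD 0` default is never taken)
  let list_values := sorted_list_keys.foldl
      (fun acc key => acc ++ [(PySem.Dict.get? counter_sorted key).getD 0]) []
  [("sorted-values", sorted_list_value), ("list-values", list_values)]

-- ===== PORT B =====
def first_Zipf_law_alt (counter : List (String × Int)) : List (String × List Int) :=
  -- ordered = sorted(counter.items(), key=lambda kv: (len(kv[0]), kv[1]))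
  let ordered := PySem.List.sorted2 counter (fun kv => PySem.Str.len kv.1) (fun kv => kv.2)
  [("sorted-values", ordered.map (fun kv => PySem.Str.len kv.1)),
   ("list-values", ordered.map (fun kv => kv.2))]

-- ===== PRECONDITION & SPEC =====
-- The parameter renders a Python dict as an association list; Pre_ excludes lists with
-- duplicate keys, which a dict cannot contain (the list is then not the rendering of any dict).
def Pre_first_Zipf_law (counter : List (String × Int)) : Prop :=
  (counter.map Prod.fst).Nodup
instance (counter : List (String × Int)) : Decidable (Pre_first_Zipf_law counter) := by
  unfold Pre_first_Zipf_law; infer_instance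

def pvWitness_first_Zipf_law : (List (String × Int)) := [("bb", 1), ("a", 2), ("c", 1)]

def Spec_first_Zipf_law (counter : List (String × Int)) (out : List (String × List Int)) : Prop := out = first_Zipf_law_alt counter
instance (counter : List (String × Int)) (out : List (String × List Int)) : Decidable (Spec_first_Zipf_law counter out) := by unfold Spec_first_Zipf_law; infer_instance

-- ===== CLAIM (what is proved, stated in full; the proofs are below) =====
def Claim_equal_first_Zipf_law : Prop := ∀ (counter : List (String × Int)), Dom_first_Zipf_law counter → Pre_first_Zipf_law counter → Spec_first_Zipf_law counter (first_Zipf_law counter)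

-- ===== LEMMAS AND PROOFS =====

-- the two insertion predicates: by the count alone, and by (length, count) lexicographically
def pvB1 {α : Type} (k1 : α → Int) : α → α → Bool := fun a b => decide (k1 a < k1 b)
def pvLex {α : Type} (k1 k2 : α → Int) : α → α → Bool :=
  fun a b => decide (k1 a < k1 b) || (!decide (k1 b < k1 a) && decide (k2 a < k2 b))

theorem pv_insertBy_cons {α : Type} (p : α → α → Bool) (x y : α) (t : List α) :
    PySem.List.insertBy p x (y :: t) =
      if p x y then x :: y :: t else y :: PySem.List.insertBy p x t := rfl

theorem pv_insertBy_nil {α : Type} (p : α → α → Bool) (x : α) :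
    PySem.List.insertBy p x [] = [x] := rfl

theorem pv_insertBy_congr {α : Type} (p q : α → α → Bool) (x : α) (l : List α)
    (h : ∀ y ∈ l, p x y = q x y) :
    PySem.List.insertBy p x l = PySem.List.insertBy q x l := by
  induction l with
  | nil => rfl
  | cons y t ih =>
    rw [pv_insertBy_cons, pv_insertBy_cons, h y (by simp),
      ih (fun z hz => h z (List.mem_cons_of_mem _ hz))]

theorem pv_map_insertBy {α β : Type} (f : α → β) (p : α → α → Bool) (q : β → β → Bool)
    (x : α) (l : List α) (h : ∀ a b, q (f a) (f b) = p a b) :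
    (PySem.List.insertBy p x l).map f = PySem.List.insertBy q (f x) (l.map f) := by
  induction l with
  | nil => rfl
  | cons y t ih =>
    rw [List.map_cons, pv_insertBy_cons, pv_insertBy_cons, h x y]
    cases hp : p x y <;> simp [ih]

theorem pv_mem_foldl {α : Type} (p : α → α → Bool) (l : List α) :
    ∀ (acc : List α) (y : α),
      (y ∈ l.foldl (fun a e => PySem.List.insertBy p e a) acc) ↔ (y ∈ acc ∨ y ∈ l) := by
  induction l with
  | nil => simp
  | cons e t ih =>
    intro acc y
    simp only [List.foldl_cons, ih, PySem.List.mem_insertBy, List.mem_cons]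
    tauto

theorem pv_lex_not_lt {α : Type} (k1 k2 : α → Int) (x y : α) (h : ¬ k2 x < k2 y) :
    pvLex k1 k2 x y = pvB1 k1 x y := by
  simp [pvLex, pvB1, h]

theorem pv_comm {α : Type} (k1 k2 : α → Int) (x y : α) (h : k2 x < k2 y) (l : List α) :
    PySem.List.insertBy (pvB1 k1) y (PySem.List.insertBy (pvLex k1 k2) x l)
      = PySem.List.insertBy (pvLex k1 k2) x (PySem.List.insertBy (pvB1 k1) y l) := by
  induction l with
  | nil =>
    by_cases h5 : k1 y < k1 x <;> by_cases h6 : k1 x < k1 y <;>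
      simp [pv_insertBy_nil, pv_insertBy_cons, pvB1, pvLex, h, h5, h6] <;> omega
  | cons c t ih =>
    by_cases h1 : k1 x < k1 c <;> by_cases h2 : k1 c < k1 x <;> by_cases h3 : k2 x < k2 c <;>
      by_cases h4 : k1 y < k1 c <;> by_cases h5 : k1 y < k1 x <;> by_cases h6 : k1 x < k1 y <;>
      simp [pv_insertBy_cons, pvB1, pvLex, ih, h, h1, h2, h3, h4, h5, h6] <;> omega

theorem pv_swap {α : Type} (k1 k2 : α → Int) (x : α) (v : List α) :
    ∀ (l : List α), (∀ y ∈ v, k2 x < k2 y) →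
      v.foldl (fun a e => PySem.List.insertBy (pvB1 k1) e a)
          (PySem.List.insertBy (pvLex k1 k2) x l)
        = PySem.List.insertBy (pvLex k1 k2) x
            (v.foldl (fun a e => PySem.List.insertBy (pvB1 k1) e a) l) := by
  induction v with
  | nil => intro l _; rfl
  | cons y t ih =>
    intro l h
    simp only [List.foldl_cons]
    rw [pv_comm k1 k2 x y (h y (by simp)) l,
      ih _ (fun z hz => h z (List.mem_cons_of_mem _ hz))]

theorem pv_insert_decomp {α : Type} (p : α → α → Bool) (x : α) (l : List α) :
    ∃ u v, l = u ++ v ∧ PySem.List.insertBy p x l = u ++ x :: v ∧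
      (∀ y ∈ u, p x y = false) ∧ (∀ h t, v = h :: t → p x h = true) := by
  induction l with
  | nil => exact ⟨[], [], rfl, rfl, by simp, by simp⟩
  | cons y t ih =>
    cases hp : p x y
    · obtain ⟨u, v, h1, h2, h3, h4⟩ := ih
      refine ⟨y :: u, v, by simp [h1], ?_, ?_, h4⟩
      · rw [pv_insertBy_cons, if_neg (by simp [hp]), h2]; rfl
      · intro z hz
        rcases List.mem_cons.mp hz with rfl | hz
        · exact hp
        · exact h3 z hz
    · exact ⟨[], y :: t, rfl, by rw [pv_insertBy_cons, if_pos hp]; rfl, by simp,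
        fun h t' ht => by cases ht; exact hp⟩

theorem pv_pairwise_insertBy {α : Type} (k2 : α → Int) (x : α) (s : List α)
    (hs : s.Pairwise (fun a b => k2 a ≤ k2 b)) :
    (PySem.List.insertBy (pvB1 k2) x s).Pairwise (fun a b => k2 a ≤ k2 b) := by
  induction s with
  | nil => simp [pv_insertBy_nil]
  | cons y t ih =>
    rw [List.pairwise_cons] at hs
    rw [pv_insertBy_cons]
    by_cases hp : k2 x < k2 y
    · rw [if_pos (by simp [pvB1, hp]), List.pairwise_cons]
      refine ⟨?_, List.pairwise_cons.mpr hs⟩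
      intro z hz
      rcases List.mem_cons.mp hz with rfl | hz
      · omega
      · have := hs.1 z hz; omega
    · rw [if_neg (by simp [pvB1, hp]), List.pairwise_cons]
      constructor
      · intro z hz
        rcases (PySem.List.mem_insertBy _ _ _ _).mp hz with rfl | hz
        · omega
        · exact hs.1 z hz
      · exact ih hs.2

theorem pv_K {α : Type} (k1 k2 : α → Int) (x : α) (s : List α)
    (hs : s.Pairwise (fun a b => k2 a ≤ k2 b)) :
    (PySem.List.insertBy (pvB1 k2) x s).foldl (fun a e => PySem.List.insertBy (pvB1 k1) e a) []
      = PySem.List.insertBy (pvLex k1 k2) x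
          (s.foldl (fun a e => PySem.List.insertBy (pvB1 k1) e a) []) := by
  obtain ⟨u, v, h1, h2, h3, h4⟩ := pv_insert_decomp (pvB1 k2) x s
  subst h1
  have hu : ∀ y ∈ u, k2 y ≤ k2 x := by
    intro y hy
    have := h3 y hy
    have : ¬ k2 x < k2 y := by simpa [pvB1] using this
    omega
  have hv : ∀ y ∈ v, k2 x < k2 y := by
    cases v with
    | nil => simp
    | cons h t =>
      have hh : k2 x < k2 h := by
        have := h4 h t rfl; simpa [pvB1] using this
      have hvp : (h :: t).Pairwise (fun a b => k2 a ≤ k2 b) :=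
        (List.pairwise_append.mp hs).2.1
      intro y hy
      rcases List.mem_cons.mp hy with rfl | hy
      · exact hh
      · have := (List.pairwise_cons.mp hvp).1 y hy; omega
  rw [h2, List.foldl_append, List.foldl_cons]
  rw [pv_insertBy_congr (pvB1 k1) (pvLex k1 k2) x _ (fun y hy => by
    rcases (pv_mem_foldl (pvB1 k1) u [] y).mp hy with h | h
    · simp at h
    · exact (pv_lex_not_lt k1 k2 x y (by have := hu y h; omega)).symm)]
  rw [pv_swap k1 k2 x v _ hv, List.foldl_append]

theorem pv_C {α : Type} (k1 k2 : α → Int) (xs : List α) :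
    ∀ (s : List α), s.Pairwise (fun a b => k2 a ≤ k2 b) →
      ((xs.foldl (fun a e => PySem.List.insertBy (pvB1 k2) e a) s).foldl
          (fun a e => PySem.List.insertBy (pvB1 k1) e a) [])
        = xs.foldl (fun a e => PySem.List.insertBy (pvLex k1 k2) e a)
            (s.foldl (fun a e => PySem.List.insertBy (pvB1 k1) e a) []) := by
  induction xs with
  | nil => intro s _; rfl
  | cons x t ih =>
    intro s hs
    simp only [List.foldl_cons]
    rw [ih _ (pv_pairwise_insertBy k2 x s hs), pv_K k1 k2 x s hs]

theorem pv_fusion {α : Type} (k1 k2 : α → Int) (xs : List α) :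
    PySem.List.sorted (PySem.List.sorted xs k2) k1 = PySem.List.sorted2 xs k1 k2 :=
  pv_C k1 k2 xs [] List.Pairwise.nil

theorem pv_foldl_map {α β : Type} (f : α → β) (k : β → Int) (l : List α) :
    ∀ (acc : List α),
      ((l.map f).foldl (fun a e => PySem.List.insertBy (pvB1 k) e a) (acc.map f))
        = (l.foldl (fun a e => PySem.List.insertBy (pvB1 (fun x => k (f x))) e a) acc).map f := by
  induction l with
  | nil => intro acc; rfl
  | cons x t ih =>
    intro acc
    simp only [List.map_cons, List.foldl_cons]
    rw [← pv_map_insertBy f (pvB1 (fun x => k (f x))) (pvB1 k) x acc (fun a b => rfl), ih]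

theorem pv_sorted_map {α β : Type} (f : α → β) (k : β → Int) (l : List α) :
    PySem.List.sorted (l.map f) k = (PySem.List.sorted l (fun a => k (f a))).map f :=
  pv_foldl_map f k l []

-- facts about building a dict from pairs with distinct keys
theorem pv_items_ofPairs (cs : List (String × Int)) (hnd : (cs.map Prod.fst).Nodup) :
    (cs.foldl (fun (d : PySem.Dict String Int) kv => d.insert kv.1 kv.2) PySem.Dict.empty).items
      = cs := by
  rw [PySem.Dict.items_foldl_insert_fresh cs (fun kv => kv.1) (fun kv => kv.2) PySem.Dict.empty
    (fun a _ => PySem.Dict.contains_empty _) hnd]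
  simp [show (PySem.Dict.empty : PySem.Dict String Int).items = [] from rfl]

-- the main equality
theorem pv_main (counter : List (String × Int)) (hnd : (counter.map Prod.fst).Nodup) :
    first_Zipf_law counter = first_Zipf_law_alt counter := by
  simp only [first_Zipf_law, first_Zipf_law_alt]
  rw [PySem.List.foldl_prod_mk
    (f := fun (d : PySem.Dict String Int) (key : String) => d.insert key (PySem.Str.len key))
    (g := fun (l : List Int) (key : String) => l ++ [PySem.Str.len key])]
  have hperm : (PySem.List.sorted counter (fun x : String × Int => x.2)).Perm counter :=
    PySem.List.sorted_perm _ _ _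
  have hndcs : ((PySem.List.sorted counter (fun x : String × Int => x.2)).map Prod.fst).Nodup :=
    ((hperm.map Prod.fst).nodup_iff).mpr hnd
  simp only [PySem.Dict.keys, PySem.Dict.values, pv_items_ofPairs _ hndcs]
  -- name the two sorted lists
  have hndks : (List.map (fun x : String × Int => x.1) (PySem.List.sorted counter fun x => x.2)).Nodup := by
    simpa [Function.comp] using hndcs
  have hks : (List.foldl (fun (d : PySem.Dict String Int) key => d.insert key (PySem.Str.len key))
      PySem.Dict.empty (List.map (fun x : String × Int => x.1) (PySem.List.sorted counter fun x => x.2))).items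
      = (List.map (fun x : String × Int => x.1) (PySem.List.sorted counter fun x => x.2)).map
          (fun k => (k, PySem.Str.len k)) := by
    have h2 := PySem.Dict.items_foldl_insert_fresh
      (List.map (fun x : String × Int => x.1) (PySem.List.sorted counter fun x => x.2))
      (fun k => k) (fun k => PySem.Str.len k) PySem.Dict.empty
      (fun a _ => PySem.Dict.contains_empty _) (by simpa using hndks)
    simpa [show (PySem.Dict.empty : PySem.Dict String Int).items = [] from rfl] using h2
  rw [hks]
  simp only [pv_sorted_map, pv_fusion, List.map_map, Function.comp_def]
  have hpermo : (PySem.List.sorted2 counter (fun kv : String × Int => PySem.Str.len kv.1)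
      (fun kv => kv.2)).Perm counter := PySem.List.sorted2_perm _ _ _ _
  have hndord : ((List.map (fun x : String × Int => (x.1, PySem.Str.len x.1))
      (PySem.List.sorted2 counter (fun kv : String × Int => PySem.Str.len kv.1) (fun kv => kv.2))).map
        Prod.fst).Nodup := by
    simpa [Function.comp_def] using (hpermo.map Prod.fst).nodup_iff.mpr hnd
  rw [pv_items_ofPairs _ hndord, PySem.List.foldl_append_singleton_eq_map]
  simp only [List.map_map, Function.comp_def, List.nil_append]
  have hget : ∀ kv : String × Int,
      kv ∈ PySem.List.sorted2 counter (fun a : String × Int => PySem.Str.len a.1) (fun x => x.2) →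
      ((List.foldl (fun (d : PySem.Dict String Int) kv => d.insert kv.1 kv.2) PySem.Dict.empty
          (PySem.List.sorted counter fun x => x.2)).get? kv.1).getD 0 = kv.2 := by
    intro kv hkv
    have hmemc : kv ∈ counter := (PySem.List.sorted2_perm counter
      (fun a : String × Int => PySem.Str.len a.1) (fun x => x.2) false).mem_iff.mp hkv
    have hmemcs : (kv.1, kv.2) ∈ (PySem.List.sorted counter fun x => x.2) := by
      simpa using hperm.mem_iff.mpr hmemc
    have hkeysnd : (List.foldl (fun (d : PySem.Dict String Int) kv => d.insert kv.1 kv.2)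
        PySem.Dict.empty (PySem.List.sorted counter fun x => x.2)).keys.Nodup := by
      simp only [PySem.Dict.keys, pv_items_ofPairs _ hndcs]
      simpa [Function.comp_def] using hndcs
    rw [PySem.Dict.get?_of_mem_items _ (by rw [pv_items_ofPairs _ hndcs]; exact hmemcs) hkeysnd]
    rfl
  rw [List.map_congr_left hget]

-- ===== VERDICT (by name: the statement is the Claim_ definition above) =====
theorem first_Zipf_law_spec : Claim_equal_first_Zipf_law := by
  intro counter _ hpre
  unfold Spec_first_Zipf_law
  exact pv_main counter hpre
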